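-- pv_equiv track=rewrite | github.com/AlexisHBioinfo/Projet_Bio_Python | Exo1.py | isGene
-- ===== SOURCE A (Python) =====
-- def oneWord(seq,start,wlen): #return a piece with a lenght = wlen of the string seq from the index start
--     a=0
--     sequence=''
--     for i in range(len(seq)):
--         if i>=start and a<wlen :
--             a=a+1
--             sequence=sequence+str(seq[i])
--     return sequence
--
-- def isCodonStart(seq,pos): #return True if the string seq has start codon
--     codon=oneWord(seq,pos,3)
--     if codon=='ATG':
--         return True
--     else :
--         return False
--
-- def isCodonStop(seq,pos): #return True if seq has a stop codon
--     codon=oneWord(seq,pos,3)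
--     if codon=='TAA' or codon=='TAG' or codon=='TGA' :
--         return True
--     else :
--         return False
--
-- def isGene(seq): #return True if seq has start codon and stop codon modulo 3
--     wlen=len(seq)
--     for i in range(0,wlen,3):
--         if isCodonStart(seq,i)==True :
--             for j in range(i,wlen,3):
--                 if isCodonStop(seq,j)==True :
--                     return True
--     return False
-- ===== SOURCE B (Python) =====
-- def isGene(seq):  # single O(n) scan: slice each frame-0 codon once; remember if an ATG was seen
--     saw_start = False
--     for p in range(0, len(seq), 3):
--         codon = seq[p:p+3]
--         if codon == 'ATG':
--             saw_start = True
--         elif saw_start and codon in ('TAA', 'TAG', 'TGA'):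
--             return True
--     return False
-- ===== Notes on version B (the rewrite author's own statement) =====
-- stated objective: faster
-- what changed: A rescans the whole string to extract every codon (oneWord) inside two nested step-3 loops; B makes a single left-to-right pass over frame-0 codons using O(1) slicing and a flag recording whether a start codon has been seen, returning True at the first stop codon after a start.
import Mathlib
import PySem

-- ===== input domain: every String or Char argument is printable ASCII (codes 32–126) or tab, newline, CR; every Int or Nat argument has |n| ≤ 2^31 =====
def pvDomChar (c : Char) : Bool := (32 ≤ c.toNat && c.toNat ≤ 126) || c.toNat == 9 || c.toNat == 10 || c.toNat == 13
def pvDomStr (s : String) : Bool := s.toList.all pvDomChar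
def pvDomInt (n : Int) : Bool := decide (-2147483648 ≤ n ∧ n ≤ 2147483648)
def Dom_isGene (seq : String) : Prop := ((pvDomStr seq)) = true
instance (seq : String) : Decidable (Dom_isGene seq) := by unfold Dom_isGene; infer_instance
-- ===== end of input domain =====

-- B replaces A's nested loops with quadratic codon extraction by one linear scan; equivalence is proved for every input (no Pre_).

-- ===== PORT A =====
-- oneWord: builds the piece char by char while scanning ALL indices of seq (as A does)
def oneWord (seq : String) (start wlen : Int) : String :=
  String.ofList
    ((PySem.List.pyRange 0 (PySem.Str.len seq) 1).foldl
      (fun (st : Int × List Char) i =>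
        if start ≤ i ∧ st.1 < wlen then
          (st.1 + 1, st.2 ++ [(PySem.List.pyGet? seq.toList i).getD ' '])
        else st)
      (0, [])).2

def isCodonStart (seq : String) (pos : Int) : Bool :=
  let codon := oneWord seq pos 3
  if codon = "ATG" then true else false

def isCodonStop (seq : String) (pos : Int) : Bool :=
  let codon := oneWord seq pos 3
  if codon = "TAA" ∨ codon = "TAG" ∨ codon = "TGA" then true else false

-- inner 'for j in range(i, wlen, 3)' loop with early return
def isGeneInner (seq : String) : List Int → Bool
  | [] => false
  | j :: rest => if isCodonStop seq j then true else isGeneInner seq rest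

-- outer 'for i in range(0, wlen, 3)' loop with early return
def isGeneOuter (seq : String) (wlen : Int) : List Int → Bool
  | [] => false
  | i :: rest =>
    if isCodonStart seq i then
      (if isGeneInner seq (PySem.List.pyRange i wlen 3) then true
       else isGeneOuter seq wlen rest)
    else isGeneOuter seq wlen rest

def isGene (seq : String) : Bool :=
  let wlen := PySem.Str.len seq
  isGeneOuter seq wlen (PySem.List.pyRange 0 wlen 3)

-- ===== PORT B =====
-- single pass over the frame-0 codon positions with a flag recording whether a start codon has been seen
def isGeneScan (seq : String) : List Int → Bool → Bool
  | [], _ => false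
  | p :: rest, saw =>
    let c := PySem.Str.slice seq (some p) (some (p + 3))
    if c = "ATG" then isGeneScan seq rest true
    else if saw && (c = "TAA" || c = "TAG" || c = "TGA") then true
    else isGeneScan seq rest saw

def isGene_alt (seq : String) : Bool :=
  isGeneScan seq (PySem.List.pyRange 0 (PySem.Str.len seq) 3) false

-- ===== PRECONDITION & SPEC =====
def Spec_isGene (seq : String) (out : Bool) : Prop := out = isGene_alt seq
instance (seq : String) (out : Bool) : Decidable (Spec_isGene seq out) := by unfold Spec_isGene; infer_instance

-- ===== CLAIM (what is proved, stated in full; the proofs are below) =====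
def Claim_equal_isGene : Prop := ∀ (seq : String), Dom_isGene seq → Spec_isGene seq (isGene seq)

-- ===== LEMMAS AND PROOFS =====

-- step-3 range: induction forms
theorem pyRange3_nil {a b : Int} (h : b ≤ a) : PySem.List.pyRange a b 3 = [] := by
  rw [PySem.List.pyRange_of_pos a b (by norm_num)]
  simp [not_lt.mpr h]

theorem pyRange3_cons {a b : Int} (h : a < b) :
    PySem.List.pyRange a b 3 = a :: PySem.List.pyRange (a + 3) b 3 := by
  rw [PySem.List.pyRange_of_pos a b (by norm_num),
      PySem.List.pyRange_of_pos (a + 3) b (by norm_num)]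
  have hc : (if a < b then ((b - a + 3 - 1) / 3).toNat else 0)
      = (if a + 3 < b then ((b - (a + 3) + 3 - 1) / 3).toNat else 0) + 1 := by
    split <;> split <;> omega
  rw [hc, List.range_succ_eq_map]
  simp only [List.map_cons, List.map_map]
  congr 1
  · push_cast; ring
  · apply List.map_congr_left
    intro k _
    simp only [Function.comp]
    push_cast; ring

-- the accumulating fold inside oneWord collects (wlen - a) chars starting at max j start
theorem oneWord_fold (cs : List Char) (start wlen : Int) :
    ∀ (k : Nat) (j a : Int) (acc : List Char), 0 ≤ j →
      (((cs.length : Int) - j).toNat ≤ k) →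
      ((PySem.List.pyRange j (cs.length : Int) 1).foldl
        (fun (st : Int × List Char) i =>
          if start ≤ i ∧ st.1 < wlen then
            (st.1 + 1, st.2 ++ [(PySem.List.pyGet? cs i).getD ' '])
          else st)
        (a, acc)).2
      = if a < wlen then acc ++ ((cs.drop (max j start).toNat).take (wlen - a).toNat)
        else acc := by
  intro k
  induction k with
  | zero =>
    intro j a acc hj hk
    have hjl : (cs.length : Int) ≤ j := by omega
    rw [PySem.List.pyRange_one_eq_nil hjl]
    have hd : cs.drop (max j start).toNat = [] := by
      apply List.drop_eq_nil_of_le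
      omega
    simp [hd]
  | succ k ih =>
    intro j a acc hj hk
    by_cases hjl : (cs.length : Int) ≤ j
    · rw [PySem.List.pyRange_one_eq_nil hjl]
      have hd : cs.drop (max j start).toNat = [] := by
        apply List.drop_eq_nil_of_le
        omega
      simp [hd]
    · push_neg at hjl
      rw [PySem.List.pyRange_one_cons hjl]
      simp only [List.foldl_cons]
      have hjn : j.toNat < cs.length := by omega
      have hjcast : j = (j.toNat : Int) := by omega
      have hget : (PySem.List.pyGet? cs j).getD ' ' = cs[j.toNat] := by
        conv_lhs => rw [hjcast]
        rw [PySem.List.pyGet?_natCast]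
        simp [List.getElem?_eq_getElem hjn]
      have hdropj : cs.drop j.toNat = cs[j.toNat] :: cs.drop (j.toNat + 1) := by
        rw [List.drop_eq_getElem_cons hjn]
      by_cases hcond : start ≤ j ∧ a < wlen
      · rw [if_pos hcond, if_pos hcond.2]
        rw [ih (j + 1) (a + 1) (acc ++ [(PySem.List.pyGet? cs j).getD ' ']) (by omega) (by omega)]
        have hmax1 : (max (j + 1) start).toNat = j.toNat + 1 := by omega
        have hmax0 : (max j start).toNat = j.toNat := by omega
        rw [hmax1, hmax0, hget, hdropj]
        by_cases ha1 : a + 1 < wlen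
        · rw [if_pos ha1]
          have ht : (wlen - a).toNat = (wlen - (a + 1)).toNat + 1 := by omega
          rw [ht, List.take_succ_cons]
          simp
        · rw [if_neg ha1]
          have ht : (wlen - a).toNat = 1 := by omega
          rw [ht, List.take_succ_cons, List.take_zero]
      · rw [if_neg hcond]
        rw [ih (j + 1) a acc (by omega) (by omega)]

        by_cases ha : a < wlen
        · rw [if_pos ha, if_pos ha]
          have hjs : j < start := by
            rcases not_and_or.mp hcond with h | h
            · omega
            · exact absurd ha h
          have hmax : max (j + 1) start = max j start := by omega
          rw [hmax]
        · rw [if_neg ha, if_neg ha]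

-- oneWord with width 3 at a nonnegative position IS the codon slice B takes
theorem oneWord_eq_slice (seq : String) (p : Int) (hp : 0 ≤ p) :
    oneWord seq p 3 = PySem.Str.slice seq (some p) (some (p + 3)) := by
  have h1 : (oneWord seq p 3).toList
      = (seq.toList.drop p.toNat).take 3 := by
    unfold oneWord
    rw [PySem.Str.len_eq]
    rw [oneWord_fold seq.toList p 3 ((seq.toList.length : Int)).toNat 0 0 [] le_rfl (by omega)]
    have hmax : (max (0 : Int) p).toNat = p.toNat := by omega
    rw [if_pos (by norm_num : (0:Int) < 3), hmax]
    simp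
  have h2 : (PySem.Str.slice seq (some p) (some (p + 3))).toList
      = (seq.toList.drop p.toNat).take 3 := by
    rw [PySem.Str.toList_slice]
    rw [PySem.Chars.slice_eq_listSlice]
    rw [PySem.List.slice_toNat seq.toList (a := p) (b := p + 3) hp (by omega)]
    have h3 : (p + 3).toNat - p.toNat = 3 := by omega
    rw [h3]
  exact String.toList_inj.mp (h1.trans h2.symm)

-- main invariant: B's scan over a tail of the codon positions equals
-- (saw && A's inner stop search) || A's remaining outer loop
theorem scan_eq_outer (seq : String) :
    ∀ (k : Nat) (a : Int) (saw : Bool), 0 ≤ a →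
      ((PySem.Str.len seq - a).toNat ≤ k) →
      isGeneScan seq (PySem.List.pyRange a (PySem.Str.len seq) 3) saw
      = ((saw && isGeneInner seq (PySem.List.pyRange a (PySem.Str.len seq) 3))
         || isGeneOuter seq (PySem.Str.len seq) (PySem.List.pyRange a (PySem.Str.len seq) 3)) := by
  intro k
  induction k with
  | zero =>
    intro a saw ha hk
    have : PySem.Str.len seq ≤ a := by omega
    rw [pyRange3_nil this]
    simp [isGeneScan, isGeneInner, isGeneOuter]
  | succ k ih =>
    intro a saw ha hk
    by_cases hal : PySem.Str.len seq ≤ a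
    · rw [pyRange3_nil hal]
      simp [isGeneScan, isGeneInner, isGeneOuter]
    · push_neg at hal
      rw [pyRange3_cons hal]
      have hsl := oneWord_eq_slice seq a ha
      have hih := fun (saw' : Bool) => ih (a + 3) saw' (by omega) (by omega)
      by_cases hatg : oneWord seq a 3 = "ATG"
      · have hslatg : PySem.Str.slice seq (some a) (some (a + 3)) = "ATG" := by
          rw [← hsl, hatg]
        have hA : isCodonStart seq a = true := by
          simp [isCodonStart, hatg]
        have hS : isCodonStop seq a = false := by
          simp only [isCodonStop]
          rw [hatg]
          decide
        simp only [isGeneScan, isGeneInner, isGeneOuter, hslatg, hA, hS]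
        rw [pyRange3_cons hal]
        simp only [isGeneInner, hS]
        rw [hih true]
        simp only [if_true, reduceIte, Bool.false_eq_true, Bool.true_and]
        cases hI : isGeneInner seq (PySem.List.pyRange (a + 3) (PySem.Str.len seq) 3) <;>
          cases hO : isGeneOuter seq (PySem.Str.len seq) (PySem.List.pyRange (a + 3) (PySem.Str.len seq) 3) <;>
          cases saw <;> simp
      · have hslatg : PySem.Str.slice seq (some a) (some (a + 3)) ≠ "ATG" := by
          rw [← hsl]; exact hatg
        have hA : isCodonStart seq a = false := by
          simp [isCodonStart, hatg]
        by_cases hstop : oneWord seq a 3 = "TAA" ∨ oneWord seq a 3 = "TAG" ∨ oneWord seq a 3 = "TGA"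
        · have hslstop : (PySem.Str.slice seq (some a) (some (a + 3)) = "TAA"
              || PySem.Str.slice seq (some a) (some (a + 3)) = "TAG"
              || PySem.Str.slice seq (some a) (some (a + 3)) = "TGA") = true := by
            rw [← hsl]
            rcases hstop with h | h | h <;> simp [h]
          have hS : isCodonStop seq a = true := by
            simp [isCodonStop, hstop]
          simp only [isGeneScan, isGeneInner, isGeneOuter, hslatg, hslstop, hA, hS,
            if_false, if_true, Bool.and_true]
          cases saw
          · simp only [Bool.false_or, reduceIte, Bool.false_eq_true]
            rw [hih false]
            simp
          · simp
        · push_neg at hstop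
          have hslstop : (PySem.Str.slice seq (some a) (some (a + 3)) = "TAA"
              || PySem.Str.slice seq (some a) (some (a + 3)) = "TAG"
              || PySem.Str.slice seq (some a) (some (a + 3)) = "TGA") = false := by
            rw [← hsl]
            simp [hstop.1, hstop.2.1, hstop.2.2]
          have hS : isCodonStop seq a = false := by
            simp [isCodonStop, hstop.1, hstop.2.1, hstop.2.2]
          simp only [isGeneScan, isGeneInner, isGeneOuter, hslatg, hslstop, hA, hS,
            Bool.and_false, Bool.false_eq_true, if_false]
          rw [hih saw]

-- ===== VERDICT (by name: the statement is the Claim_ definition above) =====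
theorem isGene_spec : Claim_equal_isGene := by
  intro seq _
  unfold Spec_isGene isGene isGene_alt
  rw [scan_eq_outer seq (PySem.Str.len seq).toNat 0 false le_rfl (by omega)]
  simp
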